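-- pv_equiv track=rewrite | github.com/RWilliams27/advent-of-code | 2024/Day 6/day_6_challenge_2.py | grid_maker
-- ===== SOURCE A (Python) =====
-- import logging, time, copy
--
-- def grid_maker(og_grid): # Makes copies of the grid, each copy having the obstacle in a different place
--     new_grid = []
--     template_grid = copy.deepcopy(og_grid)
--
--     for row_index, row in enumerate(og_grid):
--         for column_index, column in enumerate(row):
--             if og_grid[row_index][column_index] == 1 or og_grid[row_index][column_index] == 2:
--                 continue
--             temp_grid = copy.deepcopy(template_grid)
--             temp_grid[row_index][column_index] = 4
--             new_grid.append(temp_grid)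
--
--     return new_grid
-- ===== SOURCE B (Python) =====
-- def grid_maker(og_grid): # Makes copies of the grid, each copy having the obstacle in a different place
--     # Recursive decomposition: the grids with the obstacle somewhere in the first
--     # row, followed by the first row prepended to every grid produced for the rest.
--     if not og_grid:
--         return []
--     first, rest = og_grid[0], og_grid[1:]
--     return ([[v] + [r[:] for r in rest] for v in _row_variants(first)]
--             + [[first[:]] + g for g in grid_maker(rest)])
--
-- def _row_variants(row):
--     # All copies of `row` with one free cell (value not 1 and not 2) replaced by 4,
--     # by recursion on the row: variant at the head, then head prepended to each
--     # variant of the tail.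
--     if not row:
--         return []
--     head, tail = row[0], row[1:]
--     base = [] if head == 1 or head == 2 else [[4] + tail[:]]
--     return base + [[head] + v for v in _row_variants(tail)]
-- ===== Notes on version B (the rewrite author's own statement) =====
-- stated objective: alternative
-- what changed: B replaces A's index-driven deepcopy-template-then-overwrite loop with structural recursion: grids with the obstacle in the first row (computed by a recursive row-variants helper) followed by the first row prepended to every grid recursively produced for the remaining rows.
import Mathlib
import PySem

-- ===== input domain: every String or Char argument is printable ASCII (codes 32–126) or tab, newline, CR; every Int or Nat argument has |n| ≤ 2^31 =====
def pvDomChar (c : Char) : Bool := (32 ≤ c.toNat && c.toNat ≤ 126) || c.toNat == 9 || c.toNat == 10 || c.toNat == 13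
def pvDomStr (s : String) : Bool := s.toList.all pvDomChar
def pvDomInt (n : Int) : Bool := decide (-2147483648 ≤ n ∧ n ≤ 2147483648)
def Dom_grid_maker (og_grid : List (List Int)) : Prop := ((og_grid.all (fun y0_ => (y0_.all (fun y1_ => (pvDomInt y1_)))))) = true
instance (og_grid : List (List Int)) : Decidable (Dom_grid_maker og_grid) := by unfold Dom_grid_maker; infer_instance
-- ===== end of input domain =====

-- B rebuilds the output by structural recursion (obstacle in the first row, then the
-- first row prepended to the recursively-built grids for the rest) instead of A's
-- index-driven deepcopy-template-then-overwrite loops; same cost, different decomposition.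

-- ===== PORT A =====
-- deepcopy of a list of lists of ints is value-identical, so 'temp_grid = deepcopy(template); temp_grid[ri][ci] = 4'
-- is ported as replacing row ri of og_grid by that row with entry ci set to 4.
def grid_maker (og_grid : List (List Int)) : List (List (List Int)) :=
  (PySem.List.enumerate og_grid 0).foldl (fun new_grid rp =>
    (PySem.List.enumerate rp.2 0).foldl (fun acc cp =>
      if PySem.List.pyGetD (PySem.List.pyGetD og_grid rp.1 []) cp.1 0 = 1 ∨
         PySem.List.pyGetD (PySem.List.pyGetD og_grid rp.1 []) cp.1 0 = 2 then acc
      else acc ++ [PySem.List.pySetD og_grid rp.1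
             (PySem.List.pySetD (PySem.List.pyGetD og_grid rp.1 []) cp.1 4)]) new_grid) []

-- ===== PORT B =====
-- In Lean lists are immutable values, so Source B's defensive row copies 'r[:]' are identities.
def rowVariants : List Int → List (List Int)
  | [] => []
  | head :: tail =>
      (if head = 1 ∨ head = 2 then [] else [4 :: tail]) ++
      (rowVariants tail).map (fun v => head :: v)

def grid_maker_alt : List (List Int) → List (List (List Int))
  | [] => []
  | first :: rest =>
      (rowVariants first).map (fun v => v :: rest) ++
      (grid_maker_alt rest).map (fun g => first :: g)

-- ===== PRECONDITION & SPEC =====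
def Spec_grid_maker (og_grid : List (List Int)) (out : List (List (List Int))) : Prop := out = grid_maker_alt og_grid
instance (og_grid : List (List Int)) (out : List (List (List Int))) : Decidable (Spec_grid_maker og_grid out) := by unfold Spec_grid_maker; infer_instance

-- ===== CLAIM (what is proved, stated in full; the proofs are below) =====
def Claim_equal_grid_maker : Prop := ∀ (og_grid : List (List Int)), Dom_grid_maker og_grid → Spec_grid_maker og_grid (grid_maker og_grid)

-- ===== LEMMAS AND PROOFS =====

-- common Nat-indexed normal form both ports are reduced to
def natForm (og : List (List Int)) : List (List (List Int)) :=
  (List.range og.length).flatMap (fun k =>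
    ((List.range (og.getD k []).length).filter
        (fun j => decide (¬((og.getD k []).getD j 0 = 1 ∨ (og.getD k []).getD j 0 = 2)))).map
      (fun j => og.set k ((og.getD k []).set j 4)))

-- 'if cond: continue else append' loop shape
theorem foldl_skip_append {α β : Type} (l : List α) (p : α → Prop) [DecidablePred p]
    (f : α → β) (acc : List β) :
    l.foldl (fun a x => if p x then a else a ++ [f x]) acc
      = acc ++ (l.filter (fun x => decide (¬ p x))).map f := by
  induction l generalizing acc with
  | nil => simp
  | cons x xs ih =>
    by_cases h : p x <;> simp [List.foldl_cons, h, ih]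

-- outer loop over rows, each iteration appending a block
theorem foldl_block {α β : Type} (l : List α) (g : List β → α → List β) (h : α → List β)
    (hg : ∀ acc x, g acc x = acc ++ h x) (acc : List β) :
    l.foldl g acc = acc ++ l.flatMap h := by
  induction l generalizing acc with
  | nil => simp
  | cons x xs ih => simp [List.foldl_cons, hg, ih, List.append_assoc]

theorem grid_maker_eq_natForm (og : List (List Int)) : grid_maker og = natForm og := by
  unfold grid_maker
  rw [foldl_block _ _ _ (fun acc rp => foldl_skip_append _ _ _ acc)]
  rw [PySem.List.enumerate_eq_map_pyRange og ([] : List Int)]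
  rw [show PySem.List.len og = ((og.length : Nat) : Int) from by simp, PySem.List.pyRange_zero_natCast]
  simp only [List.flatMap_map, List.map_map, Function.comp_def, PySem.List.pyGetD_natCast,
    PySem.List.pySetD_natCast, List.nil_append, natForm]
  apply List.flatMap_congr
  intro k _
  rw [PySem.List.enumerate_eq_map_pyRange (og.getD k []) (0 : Int)]
  rw [show PySem.List.len (og.getD k []) = (((og.getD k []).length : Nat) : Int) from by simp,
      PySem.List.pyRange_zero_natCast]
  simp only [List.filter_map, List.map_map, Function.comp_def, PySem.List.pyGetD_natCast,
    PySem.List.pySetD_natCast]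

theorem rowVariants_eq (m : List Int) :
    rowVariants m
      = ((List.range m.length).filter
          (fun j => decide (¬(m.getD j 0 = 1 ∨ m.getD j 0 = 2)))).map (fun j => m.set j 4) := by
  induction m with
  | nil => rfl
  | cons h t ih =>
    simp only [rowVariants, List.length_cons, List.range_succ_eq_map, List.filter_cons,
      List.getD_cons_zero, List.filter_map, List.map_map, Function.comp_def,
      List.getD_cons_succ, ih]
    by_cases hh : h = 1 ∨ h = 2 <;> simp [hh]

theorem grid_maker_alt_eq_natForm (og : List (List Int)) : grid_maker_alt og = natForm og := by
  induction og with
  | nil => rfl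
  | cons first rest ih =>
    simp only [grid_maker_alt, natForm, List.length_cons, List.range_succ_eq_map,
      List.flatMap_cons, List.flatMap_map, List.getD_cons_zero, List.getD_cons_succ,
      List.set_cons_zero, List.set_cons_succ, List.map_map, Function.comp_def,
      rowVariants_eq, ih, List.map_flatMap]

-- ===== VERDICT (by name: the statement is the Claim_ definition above) =====
theorem grid_maker_spec : Claim_equal_grid_maker := by
  intro og _
  unfold Spec_grid_maker
  rw [grid_maker_eq_natForm, grid_maker_alt_eq_natForm]
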